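-- pv_equiv track=rewrite | github.com/wpdavenport/brew_assistant | tools/render_recipe_html.py | top_bullets
-- ===== SOURCE A (Python) =====
-- def top_bullets(lines: list[str]) -> list[str]:
--     bullets: list[str] = []
--     seen_bullets = False
--     for raw in lines:
--         stripped = raw.strip()
--         if not stripped:
--             if seen_bullets:
--                 break
--             continue
--         if stripped.startswith("- "):
--             seen_bullets = True
--             bullets.append(stripped[2:].strip())
--             continue
--         if seen_bullets:
--             break
--     return bullets
-- ===== SOURCE B (Python) =====
-- from itertools import groupby
--
--
-- def top_bullets(lines: list[str]) -> list[str]: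
--     # Group consecutive lines by bullet-ness and return the first bullet run.
--     for is_bullet, group in groupby(lines, key=lambda r: r.strip().startswith("- ")):
--         if is_bullet:
--             return [r.strip()[2:].strip() for r in group]
--     return []
-- ===== Notes on version B (the rewrite author's own statement) =====
-- stated objective: idiomatic
-- what changed: Replaced the stateful flag-and-break loop by grouping consecutive lines by bullet-ness with itertools.groupby and returning the first bullet group mapped through the item stripper.
import Mathlib
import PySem

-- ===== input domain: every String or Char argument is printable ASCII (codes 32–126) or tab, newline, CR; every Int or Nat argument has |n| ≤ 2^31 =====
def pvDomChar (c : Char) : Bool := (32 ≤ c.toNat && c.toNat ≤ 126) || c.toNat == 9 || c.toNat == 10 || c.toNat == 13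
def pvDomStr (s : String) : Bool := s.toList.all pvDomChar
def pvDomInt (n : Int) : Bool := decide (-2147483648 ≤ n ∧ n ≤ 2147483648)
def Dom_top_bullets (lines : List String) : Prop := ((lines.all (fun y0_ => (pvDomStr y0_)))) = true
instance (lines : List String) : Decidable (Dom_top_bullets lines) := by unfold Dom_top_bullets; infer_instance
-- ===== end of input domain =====

-- B replaces A's stateful flag-and-break loop by grouping consecutive lines by bullet-ness (itertools.groupby) and returning the first bullet group; idiomatic, same O(n) cost.


-- ===== PORT A =====
def top_bullets_go (lines : List String) (bullets : List String) (seen : Bool) : List String :=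
  match lines with
  | [] => bullets
  | raw :: rest =>
    let stripped := PySem.Str.strip raw
    if stripped = "" then
      if seen then bullets else top_bullets_go rest bullets seen
    else if PySem.Str.startswith stripped "- " then
      top_bullets_go rest (bullets ++ [PySem.Str.strip (PySem.Str.slice stripped (some 2) none)]) true
    else if seen then bullets else top_bullets_go rest bullets seen

def top_bullets (lines : List String) : List String := top_bullets_go lines [] false

-- ===== PORT B =====
-- the groupby key: r.strip().startswith("- ")
def pvIsBullet (r : String) : Bool := PySem.Str.startswith (PySem.Str.strip r) "- "

-- r.strip()[2:].strip()
def pvItem (r : String) : String := PySem.Str.strip (PySem.Str.slice (PySem.Str.strip r) (some 2) none)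

-- itertools.groupby(lines, key=pvIsBullet): consecutive runs with their shared key
def pvGroups (lines : List String) : List (Bool × List String) :=
  match lines with
  | [] => []
  | r :: rest =>
    let k := pvIsBullet r
    (k, r :: rest.takeWhile (fun x => pvIsBullet x == k)) ::
      pvGroups (rest.dropWhile (fun x => pvIsBullet x == k))
termination_by lines.length
decreasing_by
  simpa using Nat.lt_succ_of_le (List.length_dropWhile_le _ _)

def top_bullets_alt (lines : List String) : List String :=
  match (pvGroups lines).find? (fun g => g.1) with
  | some g => g.2.map pvItem
  | none => []

-- ===== PRECONDITION & SPEC =====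
def Spec_top_bullets (lines : List String) (out : List String) : Prop := out = top_bullets_alt lines
instance (lines : List String) (out : List String) : Decidable (Spec_top_bullets lines out) := by unfold Spec_top_bullets; infer_instance

-- ===== CLAIM (what is proved, stated in full; the proofs are below) =====
def Claim_equal_top_bullets : Prop := ∀ (lines : List String), Dom_top_bullets lines → Spec_top_bullets lines (top_bullets lines)

-- ===== LEMMAS AND PROOFS =====

-- the common intermediate form: the first contiguous bullet run of the list
def pvRun (lines : List String) : List String :=
  (lines.dropWhile (fun r => !pvIsBullet r)).takeWhile pvIsBullet

lemma pvIsBullet_false_of_strip_empty (r : String) (h : PySem.Str.strip r = "") :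
    pvIsBullet r = false := by
  simp [pvIsBullet, h, PySem.Str.startswith]
  decide

lemma go_seen (lines : List String) (bullets : List String) :
    top_bullets_go lines bullets true = bullets ++ (lines.takeWhile pvIsBullet).map pvItem := by
  induction lines generalizing bullets with
  | nil => simp [top_bullets_go]
  | cons raw rest ih =>
    by_cases he : PySem.Str.strip raw = ""
    · have hb := pvIsBullet_false_of_strip_empty raw he
      simp [top_bullets_go, he, List.takeWhile_cons, hb]
    · by_cases hb : pvIsBullet raw = true
      · have hs : PySem.Chars.startswith (PySem.Chars.strip raw.toList) ['-', ' '] = true := by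
          simpa [pvIsBullet] using hb
        simp [top_bullets_go, he, hs, ih, hb, pvItem]
      · have hs : PySem.Chars.startswith (PySem.Chars.strip raw.toList) ['-', ' '] = false := by
          simpa [pvIsBullet] using hb
        have hb' : pvIsBullet raw = false := by simpa using hb
        simp [top_bullets_go, he, hs, List.takeWhile_cons, hb']

lemma a_eq_run (lines : List String) :
    top_bullets_go lines [] false = (pvRun lines).map pvItem := by
  induction lines with
  | nil => simp [top_bullets_go, pvRun]
  | cons raw rest ih =>
    by_cases he : PySem.Str.strip raw = ""
    · have hb := pvIsBullet_false_of_strip_empty raw he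
      simpa [top_bullets_go, he, pvRun, List.dropWhile_cons, hb] using ih
    · by_cases hb : pvIsBullet raw = true
      · have hs : PySem.Chars.startswith (PySem.Chars.strip raw.toList) ['-', ' '] = true := by
          simpa [pvIsBullet] using hb
        simp [top_bullets_go, he, hs, go_seen, pvRun, List.dropWhile_cons,
          List.takeWhile_cons, hb, pvItem]
      · have hs : PySem.Chars.startswith (PySem.Chars.strip raw.toList) ['-', ' '] = false := by
          simpa [pvIsBullet] using hb
        have hb' : pvIsBullet raw = false := by simpa using hb
        simpa [top_bullets_go, he, hs, pvRun, List.dropWhile_cons, hb'] using ih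

lemma dropWhile_idem {α : Type} (p : α → Bool) (xs : List α) :
    (xs.dropWhile p).dropWhile p = xs.dropWhile p := by
  induction xs with
  | nil => simp
  | cons x rest ih =>
    by_cases h : p x = true
    · simpa [List.dropWhile_cons, h] using ih
    · simp [List.dropWhile_cons, h]

lemma b_eq_run (lines : List String) : top_bullets_alt lines = (pvRun lines).map pvItem := by
  induction lines using pvGroups.induct with
  | case1 => simp [top_bullets_alt, pvGroups, pvRun]
  | case2 r rest k ih =>
    by_cases hb : pvIsBullet r = true
    · have hpred : (fun x => pvIsBullet x == pvIsBullet r) = pvIsBullet := by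
        funext x; simp [hb]
      simp [top_bullets_alt, pvGroups, List.find?, hb, pvRun, List.dropWhile_cons,
        List.takeWhile_cons, hpred]
    · have hb' : pvIsBullet r = false := by simpa using hb
      have hpred : (fun x => pvIsBullet x == k) = (fun x => !pvIsBullet x) := by
        funext x; simp [k, hb']
      rw [hpred] at ih
      have hrun : pvRun (rest.dropWhile (fun x => !pvIsBullet x)) = pvRun (r :: rest) := by
        simp [pvRun, List.dropWhile_cons, hb', dropWhile_idem]
      simp [top_bullets_alt, pvGroups, hb', hpred] at ih ⊢
      rw [ih, hrun]

-- ===== VERDICT (by name: the statement is the Claim_ definition above) =====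
theorem top_bullets_spec : Claim_equal_top_bullets := by
  intro lines _
  show top_bullets lines = top_bullets_alt lines
  rw [b_eq_run, top_bullets, a_eq_run]
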